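-- pv_equiv track=rewrite | github.com/whisthq/whist | .github/workflows/helpers/aws/ecs_ec2_resource_notification.py | read_tags
-- ===== SOURCE A (Python) =====
-- def read_tags(tags, resource):
--     """
--     Reads tags for a given resource, either EC2 or ECS and returns tags
--
--     Args:
--         tags (arr): array of key value pairs
--         resource (str): current aws resource, either EC2 or ECS
--
--     Returns:
--         tuple: the branch, commit, name of the resource, and whether it was created on test
--     """
--     name = ""
--     test = "False"
--     key = "Key" if resource == "EC2" else "key"
--     value = "Value" if resource == "EC2" else "value"
--     for tag in tags:
--         if tag[key] == "created_on_test":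
--             test = tag[value]
--         if tag[key] == "Name":
--             name = tag[value]
--
--     return name, test == "True"
-- ===== SOURCE B (Python) =====
-- def read_tags(tags, resource):
--     key, value = ("Key", "Value") if resource == "EC2" else ("key", "value")
--     name = next((tag[value] for tag in reversed(tags) if tag[key] == "Name"), "")
--     test = next((tag[value] for tag in reversed(tags) if tag[key] == "created_on_test"), "False")
--     return name, test == "True"
-- ===== Notes on version B (the rewrite author's own statement) =====
-- stated objective: alternative
-- what changed: B traverses the tag list back-to-front and returns at the FIRST match for each of the two keys (last-occurrence-wins = first-in-reverse), with early termination, instead of A's single forward scan that keeps overwriting two running accumulators.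
import Mathlib
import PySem

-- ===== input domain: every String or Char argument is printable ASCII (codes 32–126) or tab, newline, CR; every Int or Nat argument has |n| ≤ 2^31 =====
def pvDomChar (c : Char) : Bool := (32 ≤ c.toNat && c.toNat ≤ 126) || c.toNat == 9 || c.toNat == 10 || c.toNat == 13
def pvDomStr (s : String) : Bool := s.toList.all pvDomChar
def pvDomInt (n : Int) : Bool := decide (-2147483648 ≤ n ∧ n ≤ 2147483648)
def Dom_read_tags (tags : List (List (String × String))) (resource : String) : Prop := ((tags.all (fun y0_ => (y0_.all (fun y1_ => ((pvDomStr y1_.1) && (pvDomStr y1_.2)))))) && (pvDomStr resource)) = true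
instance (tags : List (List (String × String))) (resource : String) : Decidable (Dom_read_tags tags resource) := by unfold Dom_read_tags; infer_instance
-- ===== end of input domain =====

-- B scans the tag list back-to-front and returns the first match for each key
-- (last-occurrence-wins = first-in-reverse, with early exit), instead of A's forward
-- scan overwriting two accumulators (objective: alternative).


-- ===== PORT A =====
-- each Python tag dict is an association list; tag[k] = first-match lookup (none = KeyError)
def loopA (key value : String) (name test : String) :
    List (List (String × String)) → Option (String × String)
  | [] => some (name, test)
  | tag :: rest =>
    match (PySem.Dict.mk tag).get? key with
    | none => none
    | some kv =>
      -- if tag[key] == "created_on_test": test = tag[value]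
      match (if kv == "created_on_test" then (PySem.Dict.mk tag).get? value else some test) with
      | none => none
      | some test' =>
        -- if tag[key] == "Name": name = tag[value]
        match (if kv == "Name" then (PySem.Dict.mk tag).get? value else some name) with
        | none => none
        | some name' => loopA key value name' test' rest

def read_tags (tags : List (List (String × String))) (resource : String) : String × Bool :=
  let key := if resource == "EC2" then "Key" else "key"
  let value := if resource == "EC2" then "Value" else "value"
  match loopA key value "" "False" tags with
  | some (name, test) => (name, test == "True")
  | none => ("", false)   -- unreachable under Pre_ (Python raises KeyError)

-- ===== PORT B =====
-- next((tag[value] for tag in reversed(tags) if tag[key] == target), dflt):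
-- first match scanning the already-reversed list, early exit
def scanRev (key value target dflt : String) :
    List (List (String × String)) → String
  | [] => dflt
  | tag :: rest =>
    match (PySem.Dict.mk tag).get? key with
    | none => dflt        -- Python raises KeyError here; unreachable under Pre_
    | some k =>
      if k == target then ((PySem.Dict.mk tag).get? value).getD dflt
                          -- .getD's none case is a Python KeyError; unreachable under Pre_
      else scanRev key value target dflt rest

def read_tags_alt (tags : List (List (String × String))) (resource : String) : String × Bool :=
  let key := if resource == "EC2" then "Key" else "key"
  let value := if resource == "EC2" then "Value" else "value"
  let name := scanRev key value "Name" "" tags.reverse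
  let test := scanRev key value "created_on_test" "False" tags.reverse
  (name, test == "True")

-- ===== PRECONDITION & SPEC =====
-- Pre_ holds exactly when Python A returns: every tag has the key field, and every tag
-- whose key maps to "created_on_test" or "Name" also has the value field (else KeyError).
def PreTag (key value : String) (tag : List (String × String)) : Bool :=
  match (PySem.Dict.mk tag).get? key with
  | none => false
  | some kv =>
    !(kv == "created_on_test" || kv == "Name") || ((PySem.Dict.mk tag).get? value).isSome

def Pre_read_tags (tags : List (List (String × String))) (resource : String) : Prop :=
  tags.all (fun tag =>
    PreTag (if resource == "EC2" then "Key" else "key")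
           (if resource == "EC2" then "Value" else "value") tag) = true
instance (tags : List (List (String × String))) (resource : String) : Decidable (Pre_read_tags tags resource) := by unfold Pre_read_tags; infer_instance

def pvWitness_read_tags : (List (List (String × String))) × String :=
  ([[("Key", "Name"), ("Value", "box")], [("Key", "created_on_test"), ("Value", "True")]], "EC2")

def Spec_read_tags (tags : List (List (String × String))) (resource : String) (out : String × Bool) : Prop := out = read_tags_alt tags resource
instance (tags : List (List (String × String))) (resource : String) (out : String × Bool) : Decidable (Spec_read_tags tags resource out) := by unfold Spec_read_tags; infer_instance

-- ===== CLAIM (what is proved, stated in full; the proofs are below) =====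
def Claim_equal_read_tags : Prop := ∀ (tags : List (List (String × String))) (resource : String), Dom_read_tags tags resource → Pre_read_tags tags resource → Spec_read_tags tags resource (read_tags tags resource)

-- ===== LEMMAS AND PROOFS =====

-- processing one appended element at the far end of the reverse scan folds it into the default
theorem scanRev_append (key value target : String) (tag : List (String × String))
    (htarget : target = "created_on_test" ∨ target = "Name") :
    ∀ (l : List (List (String × String))) (d : String),
      (∀ t ∈ l, PreTag key value t = true) →
      scanRev key value target d (l ++ [tag]) =
        scanRev key value target (scanRev key value target d [tag]) l := by
  intro l
  induction l with
  | nil => intro d _; rfl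
  | cons x l' ih =>
    intro d hl
    have hx := hl x (List.mem_cons_self ..)
    have hl' : ∀ t ∈ l', PreTag key value t = true := fun t ht => hl t (List.mem_cons_of_mem _ ht)
    unfold PreTag at hx
    cases hg : (PySem.Dict.mk x).get? key with
    | none => rw [hg] at hx; simp at hx
    | some k =>
      rw [hg] at hx
      by_cases hk : k = target
      · subst hk
        have hv : ((PySem.Dict.mk x).get? value).isSome = true := by
          rcases htarget with h | h <;> subst h <;> simpa using hx
        obtain ⟨v, hv⟩ := Option.isSome_iff_exists.mp hv
        simp [scanRev, hg, hv]
      · simp [scanRev, hg, hk, ih _ hl']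

-- A's forward accumulator loop computes exactly B's two reverse first-match scans
theorem loopA_eq_scan (key value : String) :
    ∀ (tags : List (List (String × String))) (name test : String),
      (∀ t ∈ tags, PreTag key value t = true) →
      loopA key value name test tags =
        some (scanRev key value "Name" name tags.reverse,
              scanRev key value "created_on_test" test tags.reverse) := by
  intro tags
  induction tags with
  | nil => intro name test _; rfl
  | cons tag rest ih =>
    intro name test hpre
    have htag := hpre tag (List.mem_cons_self ..)
    have hrest : ∀ t ∈ rest, PreTag key value t = true :=
      fun t ht => hpre t (List.mem_cons_of_mem _ ht)
    unfold PreTag at htag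
    cases hg : (PySem.Dict.mk tag).get? key with
    | none => rw [hg] at htag; simp at htag
    | some kv =>
      rw [hg] at htag
      have hrev : (tag :: rest).reverse = rest.reverse ++ [tag] := by simp
      have hrevpre : ∀ t ∈ rest.reverse, PreTag key value t = true := by
        intro t ht; exact hrest t (List.mem_reverse.mp ht)
      rw [hrev,
        scanRev_append key value "Name" tag (Or.inr rfl) rest.reverse name hrevpre,
        scanRev_append key value "created_on_test" tag (Or.inl rfl) rest.reverse test hrevpre]
      by_cases hc : kv = "created_on_test"
      · subst hc
        simp at htag
        obtain ⟨v, hv⟩ := Option.isSome_iff_exists.mp htag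
        simpa [loopA, scanRev, hg, hv] using ih name v hrest
      · by_cases hn : kv = "Name"
        · subst hn
          simp at htag
          obtain ⟨v, hv⟩ := Option.isSome_iff_exists.mp htag
          simpa [loopA, scanRev, hg, hv] using ih v test hrest
        · simpa [loopA, scanRev, hg, hc, hn] using ih name test hrest

-- ===== VERDICT (by name: the statement is the Claim_ definition above) =====
theorem read_tags_spec : Claim_equal_read_tags := by
  intro tags resource _ hpre
  unfold Pre_read_tags at hpre
  rw [List.all_eq_true] at hpre
  unfold Spec_read_tags read_tags read_tags_alt
  cases hE : (resource == "EC2") with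
  | true =>
    simp only [eq_self_iff_true, if_true]
    rw [loopA_eq_scan "Key" "Value" tags "" "False" (by simpa [hE] using hpre)]
  | false =>
    simp only [Bool.false_eq_true, if_false]
    rw [loopA_eq_scan "key" "value" tags "" "False" (by simpa [hE] using hpre)]
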